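-- pv_equiv track=rewrite | github.com/szeplaki/sudoku | sudoku.py | hide_numbers
-- ===== SOURCE A (Python) =====
-- def hide_numbers(merge_sudoku_array, lst_of_missings, dont_touch_numbers):
--     for i in range(len(merge_sudoku_array)):
--         for index in lst_of_missings:
--             if i == index:
--                 merge_sudoku_array[i] = '.'
--         for forbidden in dont_touch_numbers:
--             if i == forbidden:
--                 merge_sudoku_array[i] = "\033[31m{}\033[00m" .format(merge_sudoku_array[i])
--     return merge_sudoku_array
-- ===== SOURCE B (Python) =====
-- def hide_numbers(merge_sudoku_array, lst_of_missings, dont_touch_numbers):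
--     n = len(merge_sudoku_array)
--     for index in lst_of_missings:
--         if 0 <= index < n:
--             merge_sudoku_array[index] = '.'
--     for forbidden in dont_touch_numbers:
--         if 0 <= forbidden < n:
--             merge_sudoku_array[forbidden] = '\033[31m{}\033[00m'.format(merge_sudoku_array[forbidden])
--     return merge_sudoku_array
-- ===== Notes on version B (the rewrite author's own statement) =====
-- stated objective: faster
-- what changed: Replaces A's scan of every cell with nested index-list membership loops by two direct passes over the sparse index lists themselves, writing straight into the array (a bounds check makes out-of-range indices no-ops).
import Mathlib
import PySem

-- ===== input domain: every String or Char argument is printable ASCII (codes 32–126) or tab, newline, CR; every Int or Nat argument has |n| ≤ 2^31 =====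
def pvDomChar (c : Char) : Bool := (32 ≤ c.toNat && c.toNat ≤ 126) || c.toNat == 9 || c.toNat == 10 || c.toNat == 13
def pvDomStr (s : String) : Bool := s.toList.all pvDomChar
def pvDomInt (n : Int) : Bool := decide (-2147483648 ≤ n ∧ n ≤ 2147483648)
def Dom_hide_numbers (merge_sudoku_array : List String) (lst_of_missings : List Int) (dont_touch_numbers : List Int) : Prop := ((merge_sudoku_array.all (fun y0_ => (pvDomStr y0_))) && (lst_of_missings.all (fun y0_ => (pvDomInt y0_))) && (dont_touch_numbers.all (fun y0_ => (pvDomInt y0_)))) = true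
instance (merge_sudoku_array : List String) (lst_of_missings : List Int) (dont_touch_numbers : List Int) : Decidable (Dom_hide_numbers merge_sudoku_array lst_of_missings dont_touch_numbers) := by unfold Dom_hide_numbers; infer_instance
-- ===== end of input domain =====

-- B walks the two sparse index lists and writes directly at each index (bounds-checked),
-- instead of A's scan of every cell with inner membership loops over both lists.
-- Both programs mutate the argument in place in Python; the equivalence is about the return value.

-- the Python format string "\033[31m{}\033[00m".format(v), used by both programs
def redWrap (s : String) : String := "\x1b[31m" ++ s ++ "\x1b[00m"

-- ===== PORT A =====
def hide_numbers (merge_sudoku_array : List String) (lst_of_missings : List Int) (dont_touch_numbers : List Int) : List String :=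
  (List.range merge_sudoku_array.length).foldl (fun arr (i : Nat) =>
    let arr := lst_of_missings.foldl (fun arr index =>
      if (i : Int) == index then arr.set i "." else arr) arr
    let arr := dont_touch_numbers.foldl (fun arr forbidden =>
      if (i : Int) == forbidden then arr.set i (redWrap (arr.getD i "")) else arr) arr
    arr) merge_sudoku_array

-- ===== PORT B =====
def hide_numbers_alt (merge_sudoku_array : List String) (lst_of_missings : List Int) (dont_touch_numbers : List Int) : List String :=
  let n : Int := merge_sudoku_array.length
  let arr := lst_of_missings.foldl (fun arr index =>
    if 0 ≤ index ∧ index < n then arr.set index.toNat "." else arr) merge_sudoku_array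
  dont_touch_numbers.foldl (fun arr forbidden =>
    if 0 ≤ forbidden ∧ forbidden < n then
      arr.set forbidden.toNat (redWrap (arr.getD forbidden.toNat "")) else arr) arr

-- ===== PRECONDITION & SPEC =====
def Spec_hide_numbers (merge_sudoku_array : List String) (lst_of_missings : List Int) (dont_touch_numbers : List Int) (out : List String) : Prop := out = hide_numbers_alt merge_sudoku_array lst_of_missings dont_touch_numbers
instance (merge_sudoku_array : List String) (lst_of_missings : List Int) (dont_touch_numbers : List Int) (out : List String) : Decidable (Spec_hide_numbers merge_sudoku_array lst_of_missings dont_touch_numbers out) := by unfold Spec_hide_numbers; infer_instance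

-- ===== CLAIM =====
def Claim_equal_hide_numbers : Prop := ∀ (merge_sudoku_array : List String) (lst_of_missings : List Int) (dont_touch_numbers : List Int), Dom_hide_numbers merge_sudoku_array lst_of_missings dont_touch_numbers → Spec_hide_numbers merge_sudoku_array lst_of_missings dont_touch_numbers (hide_numbers merge_sudoku_array lst_of_missings dont_touch_numbers)

-- ===== LEMMAS AND PROOFS =====

-- the per-cell transformation both programs compute
def fCell (m d : List Int) (i : Nat) (c : String) : String :=
  redWrap^[d.count (i : Int)] (if (i : Int) ∈ m then "." else c)

theorem missFold (m : List Int) (i : Nat) (arr : List String) :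
    m.foldl (fun arr index => if (i : Int) == index then arr.set i "." else arr) arr
      = if (i : Int) ∈ m then arr.set i "." else arr := by
  induction m generalizing arr with
  | nil => simp
  | cons x xs ih =>
    rw [List.foldl_cons]
    by_cases h : (i : Int) = x
    · rw [if_pos (by simp [h]), ih]
      by_cases hm : (i : Int) ∈ xs <;> simp [h, List.set_set]
    · rw [if_neg (by simp [h]), ih]
      simp [List.mem_cons, h]

def gI (i : Nat) (arr : List String) : List String := arr.set i (redWrap (arr.getD i ""))

theorem forbFold (d : List Int) (i : Nat) (arr : List String) :
    d.foldl (fun arr forbidden =>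
        if (i : Int) == forbidden then arr.set i (redWrap (arr.getD i "")) else arr) arr
      = (gI i)^[d.count (i : Int)] arr := by
  induction d generalizing arr with
  | nil => rfl
  | cons x xs ih =>
    rw [List.foldl_cons]
    by_cases h : (i : Int) = x
    · rw [if_pos (by simp [h]), ih,
        show arr.set i (redWrap (arr.getD i "")) = gI i arr from rfl,
        ← Function.iterate_succ_apply]
      congr 1
      simp [h]
    · rw [if_neg (by simp [h]), ih]
      congr 1
      simp [List.count_cons]
      exact fun hx => h hx.symm

theorem length_gI_iter (i k : Nat) (arr : List String) :
    ((gI i)^[k] arr).length = arr.length := by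
  induction k generalizing arr with
  | zero => rfl
  | succ k ih => simp [Function.iterate_succ_apply, gI, ih]

theorem getD_gI_iter (i k j : Nat) (arr : List String) (hi : i < arr.length) :
    ((gI i)^[k] arr).getD j "" = if j = i then redWrap^[k] (arr.getD i "") else arr.getD j "" := by
  induction k generalizing arr with
  | zero => by_cases hj : j = i <;> simp [hj]
  | succ k ih =>
    rw [Function.iterate_succ_apply, ih (gI i arr) (by simp [gI]; omega)]
    by_cases hj : j = i
    · subst hj
      have hset : (gI j arr).getD j "" = redWrap (arr.getD j "") := by
        simp [gI, List.getD_eq_getElem?_getD, List.getElem?_set_self hi]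
      rw [hset, ← Function.iterate_succ_apply]
      simp
    · simp only [if_neg hj]
      simp [gI, List.getD_eq_getElem?_getD, List.getElem?_set_ne (Ne.symm hj)]

theorem step_length (m d : List Int) (i : Nat) (arr : List String) :
    ((gI i)^[d.count (i : Int)] (if (i : Int) ∈ m then arr.set i "." else arr)).length
      = arr.length := by
  rw [length_gI_iter]; split <;> simp

theorem step_getD (m d : List Int) (i j : Nat) (arr : List String) (hi : i < arr.length) :
    ((gI i)^[d.count (i : Int)] (if (i : Int) ∈ m then arr.set i "." else arr)).getD j ""
      = if j = i then fCell m d i (arr.getD i "") else arr.getD j "" := by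
  have hW : i < (if (i : Int) ∈ m then arr.set i "." else arr).length := by
    split <;> simpa
  rw [getD_gI_iter i _ j _ hW]
  by_cases hj : j = i
  · subst hj
    rw [if_pos rfl, if_pos rfl]
    unfold fCell
    have hv : (if (j : Int) ∈ m then arr.set j "." else arr).getD j ""
        = if (j : Int) ∈ m then "." else arr.getD j "" := by
      split
      · simp [List.getD_eq_getElem?_getD, List.getElem?_set_self hi]
      · rfl
    rw [hv]
  · simp only [if_neg hj]
    split
    · simp [List.getD_eq_getElem?_getD, List.getElem?_set_ne (Ne.symm hj)]
    · rfl

-- A's outer fold, characterised pointwise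
theorem outer_fold (m d : List Int) (a : List String) (k : Nat) (hk : k ≤ a.length) :
    ∃ r, (List.range k).foldl (fun arr i =>
        (gI i)^[d.count (i : Int)] (if (i : Int) ∈ m then arr.set i "." else arr)) a = r ∧
      r.length = a.length ∧
      ∀ j, r.getD j "" = if j < k then fCell m d j (a.getD j "") else a.getD j "" := by
  induction k with
  | zero => exact ⟨a, rfl, rfl, by simp⟩
  | succ k ih =>
    obtain ⟨r, hr, hlen, hget⟩ := ih (by omega)
    refine ⟨_, by rw [List.range_succ, List.foldl_append, List.foldl_cons, List.foldl_nil, hr],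
      ?_, ?_⟩
    · rw [step_length]; exact hlen
    · intro j
      rw [step_getD m d k j r (by omega)]
      by_cases hj : j = k
      · subst hj
        rw [if_pos rfl, if_pos (Nat.lt_succ_self _)]
        have hk2 := hget j
        rw [if_neg (Nat.lt_irrefl j)] at hk2
        rw [hk2]
      · rw [if_neg hj, hget j]
        by_cases h2 : j < k
        · simp [h2, Nat.lt_succ_of_lt h2]
        · have h3 : ¬ j < k + 1 := by omega
          simp [h2, h3]

theorem hide_numbers_eq_fold (a : List String) (m d : List Int) :
    hide_numbers a m d
      = (List.range a.length).foldl (fun arr i =>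
          (gI i)^[d.count (i : Int)] (if (i : Int) ∈ m then arr.set i "." else arr)) a := by
  unfold hide_numbers
  congr 1
  funext arr i
  dsimp only
  rw [missFold, forbFold]

-- B's first pass: direct '.'-writes over the missing-index list, characterised pointwise
theorem missB (m : List Int) (n : Int) (a : List String) (hn : n = (a.length : Int)) :
    (m.foldl (fun arr index =>
        if 0 ≤ index ∧ index < n then arr.set index.toNat "." else arr) a).length = a.length ∧
    ∀ j : Nat, j < a.length →
      (m.foldl (fun arr index =>
        if 0 ≤ index ∧ index < n then arr.set index.toNat "." else arr) a).getD j ""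
        = if (j : Int) ∈ m then "." else a.getD j "" := by
  induction m generalizing a with
  | nil => exact ⟨rfl, fun j _ => by simp⟩
  | cons x xs ih =>
    rw [List.foldl_cons]
    by_cases hx : 0 ≤ x ∧ x < n
    · rw [if_pos hx]
      have hlen : (a.set x.toNat ".").length = a.length := by simp
      obtain ⟨ihl, ihg⟩ := ih (a.set x.toNat ".") (by rw [hlen]; exact hn)
      refine ⟨by rw [ihl, hlen], fun j hj => ?_⟩
      rw [ihg j (by omega)]
      by_cases hm : (j : Int) ∈ xs
      · simp [hm]
      · rw [if_neg hm]
        by_cases hje : (j : Int) = x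
        · have hjx : j = x.toNat := by omega
          rw [if_pos (by simp [hje]),
            List.getD_eq_getElem?_getD, hjx, List.getElem?_set_self (by omega)]
          rfl
        · rw [if_neg (by simp [List.mem_cons, hje, hm]),
            List.getD_eq_getElem?_getD, List.getElem?_set_ne (by omega)]
          rfl
    · rw [if_neg hx]
      obtain ⟨ihl, ihg⟩ := ih a hn
      refine ⟨ihl, fun j hj => ?_⟩
      rw [ihg j hj]
      have hje : (j : Int) ≠ x := by omega
      simp [List.mem_cons, hje]
-- B's second pass: direct red-wrap writes over the forbidden-index list, characterised pointwise
theorem forbB (d : List Int) (n : Int) (a : List String) (hn : n = (a.length : Int)) :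
    (d.foldl (fun arr forbidden =>
        if 0 ≤ forbidden ∧ forbidden < n then
          arr.set forbidden.toNat (redWrap (arr.getD forbidden.toNat "")) else arr) a).length
      = a.length ∧
    ∀ j : Nat, j < a.length →
      (d.foldl (fun arr forbidden =>
        if 0 ≤ forbidden ∧ forbidden < n then
          arr.set forbidden.toNat (redWrap (arr.getD forbidden.toNat "")) else arr) a).getD j ""
        = redWrap^[d.count (j : Int)] (a.getD j "") := by
  induction d generalizing a with
  | nil => exact ⟨rfl, fun j _ => by simp⟩
  | cons x xs ih =>
    rw [List.foldl_cons]
    by_cases hx : 0 ≤ x ∧ x < n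
    · rw [if_pos hx]
      set a' := a.set x.toNat (redWrap (a.getD x.toNat "")) with ha'
      have hlen : a'.length = a.length := by simp [ha']
      obtain ⟨ihl, ihg⟩ := ih a' (by rw [hlen]; exact hn)
      refine ⟨by rw [ihl, hlen], fun j hj => ?_⟩
      rw [ihg j (by omega)]
      by_cases hje : (j : Int) = x
      · have hjx : j = x.toNat := by omega
        have hget : a'.getD j "" = redWrap (a.getD j "") := by
          rw [ha', List.getD_eq_getElem?_getD, hjx, List.getElem?_set_self (by omega)]
          simp [List.getD_eq_getElem?_getD]
        rw [hget, ← Function.iterate_succ_apply]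
        congr 1
        simp [hje]
      · have hget : a'.getD j "" = a.getD j "" := by
          rw [ha', List.getD_eq_getElem?_getD, List.getElem?_set_ne (by omega)]
          rfl
        rw [hget]
        congr 1
        simp [List.count_cons]
        exact fun hx2 => hje hx2.symm
    · rw [if_neg hx]
      obtain ⟨ihl, ihg⟩ := ih a hn
      refine ⟨ihl, fun j hj => ?_⟩
      rw [ihg j hj]
      congr 1
      have hje : (j : Int) ≠ x := by omega
      simp [List.count_cons]
      omega

-- ===== VERDICT =====
theorem hide_numbers_spec : Claim_equal_hide_numbers := by
  intro a m d _
  unfold Spec_hide_numbers hide_numbers_alt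
  rw [hide_numbers_eq_fold]
  dsimp only
  obtain ⟨r, hr, hlen, hget⟩ := outer_fold m d a a.length le_rfl
  rw [hr]
  obtain ⟨mlen, mget⟩ := missB m (a.length : Int) a rfl
  set a1 := m.foldl (fun arr index =>
    if 0 ≤ index ∧ index < (a.length : Int) then arr.set index.toNat "." else arr) a with ha1
  obtain ⟨flen, fget⟩ := forbB d (a.length : Int) a1 (by rw [mlen])
  apply List.ext_getElem
  · rw [hlen, flen, mlen]
  · intro j h1 h2
    have hj : j < a.length := by omega
    have hA := hget j
    rw [if_pos hj, List.getD_eq_getElem r "" h1] at hA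
    have hB := fget j (by omega)
    rw [List.getD_eq_getElem _ "" h2] at hB
    rw [hA, hB, mget j hj]
    rfl
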